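-- pv_equiv track=rewrite | github.com/yudai-patronai/problembook | problems/while/triangle/test_generator.py | get_triangle
-- ===== SOURCE A (Python) =====
-- def get_triangle(N):
--     triangle = ""
--     counter = 1
--     for i in range(1, N+1):
--         for _ in range(i):
--             triangle += str(counter) + " "
--             counter += 1
--         triangle += "\n"
--
--     return triangle[:-1]
-- ===== SOURCE B (Python) =====
-- def get_triangle(N):
--     rows = []
--     for i in range(1, N + 1):
--         start = i * (i - 1) // 2 + 1
--         rows.append(" ".join(str(start + j) for j in range(i)) + " ")
--     return "\n".join(rows)
-- ===== Notes on version B (the rewrite author's own statement) =====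
-- stated objective: alternative
-- what changed: Replaces the cross-loop running counter and repeated string concatenation (plus the final [:-1] strip) with a closed-form first number per row (i*(i-1)//2+1) and join-built rows joined by newlines.
import Mathlib
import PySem

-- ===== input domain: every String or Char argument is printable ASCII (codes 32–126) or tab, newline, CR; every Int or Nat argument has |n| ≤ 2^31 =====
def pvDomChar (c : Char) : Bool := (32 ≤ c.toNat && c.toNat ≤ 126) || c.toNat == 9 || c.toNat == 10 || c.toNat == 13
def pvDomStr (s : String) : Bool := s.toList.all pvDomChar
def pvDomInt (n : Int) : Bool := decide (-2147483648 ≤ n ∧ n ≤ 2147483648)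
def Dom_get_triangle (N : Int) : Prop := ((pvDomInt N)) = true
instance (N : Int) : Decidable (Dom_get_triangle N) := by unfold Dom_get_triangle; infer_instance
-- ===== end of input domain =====

-- B drops A's threaded running counter and string concatenation: each row's first number is
-- computed in closed form (i*(i-1)//2 + 1) and the rows are assembled with joins; same cost class.


-- ===== PORT A =====
def get_triangle (N : Int) : String :=
  let st := (PySem.List.pyRange 1 (N+1) 1).foldl
    (fun (st : List Char × Int) i =>
      let st2 := (PySem.List.pyRange 0 i 1).foldl
        (fun (st : List Char × Int) _ => (st.1 ++ PySem.Int.toChars st.2 ++ [' '], st.2 + 1)) st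
      (st2.1 ++ ['\n'], st2.2))
    (([] : List Char), (1 : Int))
  String.ofList (PySem.List.slice st.1 none (some (-1)))

-- ===== PORT B =====
def get_triangle_alt (N : Int) : String :=
  let rows := (PySem.List.pyRange 1 (N+1) 1).map (fun i =>
    let start := PySem.Int.floordiv (i * (i - 1)) 2 + 1
    PySem.Chars.join [' ']
      ((PySem.List.pyRange 0 i 1).map (fun j => PySem.Int.toChars (start + j))) ++ [' '])
  String.ofList (PySem.Chars.join ['\n'] rows)

-- ===== PRECONDITION & SPEC =====
def Spec_get_triangle (N : Int) (out : String) : Prop := out = get_triangle_alt N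
instance (N : Int) (out : String) : Decidable (Spec_get_triangle N out) := by unfold Spec_get_triangle; infer_instance

-- ===== CLAIM (what is proved, stated in full; the proofs are below) =====
def Claim_equal_get_triangle : Prop := ∀ (N : Int), Dom_get_triangle N → Spec_get_triangle N (get_triangle N)

-- ===== LEMMAS AND PROOFS =====

-- triangular number T n = 1 + 2 + ... + n
def pvT : Nat → Nat
  | 0 => 0
  | n+1 => pvT n + (n+1)

-- characters of one row of A without the trailing newline: numbers c, c+1, ..., c+i-1 each followed by ' '
def pvRowNums (c : Int) (i : Nat) : List Char :=
  (List.range i).flatMap (fun k : Nat => PySem.Int.toChars (c + (k:Int)) ++ [' '])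

def pvRowA (m : Nat) : List Char := pvRowNums ((pvT m : Int) + 1) (m + 1)

lemma pvT_double (n : Nat) : 2 * pvT n = n * (n + 1) := by
  induction n with
  | zero => rfl
  | succ n ih => simp [pvT]; ring_nf; ring_nf at ih; omega

lemma pvRowNums_succ (c : Int) (n : Nat) :
    pvRowNums c (n + 1) = PySem.Int.toChars c ++ [' '] ++ pvRowNums (c + 1) n := by
  unfold pvRowNums
  rw [List.range_succ_eq_map, List.flatMap_cons, List.flatMap_map]
  simp only [Nat.cast_zero, add_zero, List.append_assoc]
  congr 1
  congr 1
  apply List.flatMap_congr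
  intro k _
  congr 2
  push_cast
  ring

lemma pv_inner (l : List Int) (acc : List Char) (c : Int) :
    l.foldl (fun (st : List Char × Int) _ =>
      (st.1 ++ PySem.Int.toChars st.2 ++ [' '], st.2 + 1)) (acc, c)
    = (acc ++ pvRowNums c l.length, c + l.length) := by
  induction l generalizing acc c with
  | nil => simp [pvRowNums]
  | cons a t ih =>
    rw [List.foldl_cons, ih]
    simp only [List.length_cons, Prod.mk.injEq]
    constructor
    · rw [pvRowNums_succ]
      simp
    · push_cast
      ring

lemma pv_outer (n : Nat) :
    (PySem.List.pyRange 1 ((n:Int)+1) 1).foldl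
      (fun (st : List Char × Int) i =>
        let st2 := (PySem.List.pyRange 0 i 1).foldl
          (fun (st : List Char × Int) _ => (st.1 ++ PySem.Int.toChars st.2 ++ [' '], st.2 + 1)) st
        (st2.1 ++ ['\n'], st2.2))
      (([] : List Char), (1 : Int))
    = ((List.range n).flatMap (fun m => pvRowA m ++ ['\n']), (pvT n : Int) + 1) := by
  induction n with
  | zero =>
    rw [PySem.List.pyRange_one_eq_nil (by omega)]
    simp [pvT]
  | succ n ih =>
    have hsplit : PySem.List.pyRange 1 (((n+1:Nat):Int)+1) 1
        = PySem.List.pyRange 1 ((n:Int)+1) 1 ++ [(n:Int)+1] := by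
      push_cast
      exact PySem.List.pyRange_one_succ_right (by omega)
    rw [hsplit, List.foldl_append, ih, List.foldl_cons, List.foldl_nil]
    simp only []
    have hin := pv_inner (PySem.List.pyRange 0 ((n:Int)+1) 1)
      ((List.range n).flatMap (fun m => pvRowA m ++ ['\n'])) ((pvT n : Int) + 1)
    have hlen : (PySem.List.pyRange 0 ((n:Int)+1) 1).length = n + 1 := by
      rw [PySem.List.length_pyRange_one]; omega
    rw [hlen] at hin
    rw [hin]
    simp only [Prod.mk.injEq]
    constructor
    · rw [List.range_succ, List.flatMap_append]
      simp [pvRowA]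
    · simp [pvT]; ring

-- flatMap with a trailing separator char is 'join sep' plus that final char (nonempty list)
lemma pv_flatMap_sep {α : Type} (l : List α) (f : α → List Char) (c : Char) (h : l ≠ []) :
    l.flatMap (fun x => f x ++ [c]) = PySem.Chars.join [c] (l.map f) ++ [c] := by
  induction l with
  | nil => simp at h
  | cons a t ih =>
    cases t with
    | nil => simp [PySem.Chars.join_singleton]
    | cons b r =>
      rw [List.flatMap_cons, List.map_cons, List.map_cons, PySem.Chars.join_cons_cons,
        ih (by simp)]
      simp

-- dropping the final char of that shape gives exactly the join
lemma pv_dropLast_flatMap {α : Type} (l : List α) (f : α → List Char) (c : Char) (h : l ≠ []) :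
    (l.flatMap (fun x => f x ++ [c])).dropLast = PySem.Chars.join [c] (l.map f) := by
  rw [pv_flatMap_sep l f c h, List.dropLast_concat]

theorem pv_main (N : Int) : get_triangle N = get_triangle_alt N := by
  unfold get_triangle get_triangle_alt
  by_cases hN : N ≤ 0
  · rw [PySem.List.pyRange_one_eq_nil (by omega)]
    simp [PySem.List.slice_to_neg_one, PySem.Chars.join_nil]
  · rw [not_le] at hN
    obtain ⟨n, hn⟩ : ∃ n : Nat, N = (n : Int) := ⟨N.toNat, by omega⟩
    have hnpos : 0 < n := by omega
    subst hn
    rw [pv_outer n]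
    simp only [PySem.List.slice_to_neg_one]
    congr 1
    rw [pv_dropLast_flatMap _ _ _ (by simp only [ne_eq, List.range_eq_nil]; omega)]
    congr 1
    have hrange : PySem.List.pyRange 1 ((n:Int)+1) 1
        = (List.range n).map (fun k : Nat => (1:Int) + (k:Int)) := by
      rw [PySem.List.pyRange_one, show ((n:Int)+1-(1:Int)).toNat = n from by omega]
    rw [hrange, List.map_map]
    apply List.map_congr_left
    intro m hm
    simp only [Function.comp]
    -- B's row for i = 1 + m equals A's row pvRowA m
    have hstart : PySem.Int.floordiv (((1:Int) + m) * (((1:Int) + m) - 1)) 2 = (pvT m : Int) := by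
      have h2 : ((1:Int) + m) * (((1:Int) + m) - 1) = 2 * (pvT m : Int) := by
        have h := pvT_double m
        have h' : (2 * pvT m : Int) = (m : Int) * ((m:Int) + 1) := by exact_mod_cast congrArg (Nat.cast : Nat → Int) h
        linear_combination -h'
      rw [h2, PySem.Int.floordiv_eq_ediv_of_pos (by omega), Int.mul_ediv_cancel_left _ (by omega)]
    rw [pvRowA, pvRowNums,
      pv_flatMap_sep _ _ _ (by simp [List.range_eq_nil])]
    have hr2 : PySem.List.pyRange 0 ((1:Int) + m) 1
        = (List.range (m+1)).map (fun k : Nat => ((k:Int))) := by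
      rw [PySem.List.pyRange_one]
      simp only [sub_zero]
      rw [show ((1:Int) + m).toNat = m + 1 by omega]
      simp
    rw [hr2, List.map_map, hstart]
    rfl

-- ===== VERDICT (by name: the statement is the Claim_ definition above) =====
theorem get_triangle_spec : Claim_equal_get_triangle := by
  intro N _
  unfold Spec_get_triangle
  exact pv_main N
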